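-- pv_equiv track=rewrite | github.com/lakshmanmallidi/AnalyzeBucks | operations.py | findstem
-- ===== SOURCE A (Python) =====
-- def findstem(arr):
--     result = []
--     for x in range(len(arr)):
--         subparts = arr[x].split(" ")
--         for i in range(len(subparts)):
--             for j in range(i+1, len(subparts)+1):
--                 part = " ".join(subparts[i:j])
--                 count = 0
--                 for y in range(len(arr)):
--                     if (part in arr[y]) and (x != y):
--                         count = count+1
--                 result.append((count, part))
--     maxval = 0
--     result_str = ""
--     for count, str_part in result:
--         if(count > maxval):
--             maxval = count
--             result_str = str_part
--         elif(count == maxval and len(str_part) > len(result_str)):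
--             result_str = str_part
--     return result_str
-- ===== SOURCE B (Python) =====
-- def findstem(arr):
--     # stage 1: distinct word-span candidates, in first-occurrence order
--     parts = []
--     seen = set()
--     for s in arr:
--         w = s.split(" ")
--         for i in range(len(w)):
--             for j in range(i + 1, len(w) + 1):
--                 p = " ".join(w[i:j])
--                 if p not in seen:
--                     seen.add(p)
--                     parts.append(p)
--     # stage 2: substring index: cnt[u] = number of strings of arr containing u,
--     # built by enumerating each string's distinct substrings (no containment scans)
--     cnt = {}
--     for t in arr:
--         subs = set()
--         for i in range(len(t) + 1):
--             for j in range(i, len(t) + 1):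
--                 subs.add(t[i:j])
--         for u in subs:
--             cnt[u] = cnt.get(u, 0) + 1
--     # stage 3: pick best candidate: max count (excluding its own string), tie longest, first wins
--     best = ""
--     bc = 0
--     for p in parts:
--         c = cnt.get(p, 0) - 1
--         if c > bc or (c == bc and len(p) > len(best)):
--             bc = c
--             best = p
--     return best
-- ===== Notes on version B (the rewrite author's own statement) =====
-- stated objective: faster
-- what changed: B replaces A's per-occurrence containment scans (for every word-span occurrence of every string, a scan over all other strings) by three staged passes: collect the distinct word-span candidates in first-occurrence order, build a substring-count index by inserting each string's distinct substrings into a counter dict (so no 'part in other string' scan remains at all), then select the best candidate (global count minus 1 since a part always occurs in its own string; tie longest, first wins) by dict lookup.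
import Mathlib
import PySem

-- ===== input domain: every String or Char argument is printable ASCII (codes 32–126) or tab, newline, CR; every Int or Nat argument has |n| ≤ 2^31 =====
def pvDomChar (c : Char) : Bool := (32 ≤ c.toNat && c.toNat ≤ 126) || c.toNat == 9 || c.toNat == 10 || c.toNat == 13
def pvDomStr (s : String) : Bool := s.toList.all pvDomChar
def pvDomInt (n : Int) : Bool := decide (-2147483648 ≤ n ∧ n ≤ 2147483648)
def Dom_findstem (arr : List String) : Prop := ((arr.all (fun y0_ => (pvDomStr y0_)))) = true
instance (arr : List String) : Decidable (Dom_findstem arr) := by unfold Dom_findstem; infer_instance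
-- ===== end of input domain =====

-- B replaces A's per-occurrence containment scans by three staged passes: collect the
-- distinct word-span candidates in first-occurrence order, build a substring-count index
-- (each string's distinct substrings into a counter dict, so no 'part in other' scan
-- remains), then select the best candidate (count, tie longest, first wins) from the index.

-- ===== PORT A =====
def findstem (arr : List String) : String :=
  let result : List (Int × String) :=
    (PySem.List.pyRange 0 (arr.length : Int)).foldl (fun result x =>
      let subparts := (PySem.Str.split? (PySem.List.pyGetD arr x "") " ").getD []
      (PySem.List.pyRange 0 (subparts.length : Int)).foldl (fun result i =>
        (PySem.List.pyRange (i+1) ((subparts.length : Int)+1)).foldl (fun result j =>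
          let part := PySem.Str.join " " (PySem.List.slice subparts (some i) (some j))
          let count := (PySem.List.pyRange 0 (arr.length : Int)).foldl (fun count y =>
            if PySem.Str.isIn part (PySem.List.pyGetD arr y "") && !(x == y)
            then count + 1 else count) (0 : Int)
          result ++ [(count, part)]) result) result) []
  let fin := result.foldl (fun (st : Int × String) cp =>
      if cp.1 > st.1 then (cp.1, cp.2)
      else if cp.1 == st.1 && PySem.Str.len cp.2 > PySem.Str.len st.2 then (st.1, cp.2)
      else st) ((0 : Int), "")
  fin.2

-- ===== PORT B =====
def findstem_alt (arr : List String) : String :=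
  -- stage 1: distinct word-span candidates, in first-occurrence order
  let gen := arr.foldl (fun (acc : PySem.Set String × List String) s =>
      let w := (PySem.Str.split? s " ").getD []
      (PySem.List.pyRange 0 (w.length : Int)).foldl (fun acc i =>
        (PySem.List.pyRange (i+1) ((w.length : Int)+1)).foldl (fun acc j =>
          let p := PySem.Str.join " " (PySem.List.slice w (some i) (some j))
          if PySem.Set.contains acc.1 p then acc
          else (PySem.Set.add acc.1 p, acc.2 ++ [p])) acc) acc)
    ((PySem.Set.empty : PySem.Set String), ([] : List String))
  let parts := gen.2
  -- stage 2: substring index: cnt[u] = number of strings of arr containing u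
  let cnt := arr.foldl (fun (d : PySem.Dict String Int) t =>
      let subs := (PySem.List.pyRange 0 ((PySem.Str.len t : Int) + 1)).foldl (fun sb i =>
          (PySem.List.pyRange i ((PySem.Str.len t : Int) + 1)).foldl (fun sb j =>
            PySem.Set.add sb (PySem.Str.slice t (some i) (some j))) sb)
        (PySem.Set.empty : PySem.Set String)
      subs.foldl (fun d u => d.insert u (d.getD u 0 + 1)) d)
    (PySem.Dict.empty : PySem.Dict String Int)
  -- stage 3: pick best candidate: max count (excluding its own string), tie longest, first wins
  let fin := parts.foldl (fun (st : Int × String) p =>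
      let c := cnt.getD p 0 - 1
      if c > st.1 || (c == st.1 && PySem.Str.len p > PySem.Str.len st.2)
      then (c, p) else st) ((0 : Int), "")
  fin.2

-- ===== PRECONDITION & SPEC =====
def Spec_findstem (arr : List String) (out : String) : Prop := out = findstem_alt arr
instance (arr : List String) (out : String) : Decidable (Spec_findstem arr out) := by unfold Spec_findstem; infer_instance

-- ===== CLAIM (what is proved, stated in full; the proofs are below) =====
def Claim_equal_findstem : Prop := ∀ (arr : List String), Dom_findstem arr → Spec_findstem arr (findstem arr)

-- ===== LEMMAS AND PROOFS =====

-- A's selection step, named.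
def pvSel (st cp : Int × String) : Int × String :=
  if cp.1 > st.1 then (cp.1, cp.2)
  else if cp.1 == st.1 && PySem.Str.len cp.2 > PySem.Str.len st.2 then (st.1, cp.2)
  else st

def pvWords (s : String) : List String := (PySem.Str.split? s " ").getD []

-- all word-span parts of one string, in generation order
def pvParts (s : String) : List String :=
  (PySem.List.pyRange 0 ((pvWords s).length : Int)).flatMap (fun i =>
    (PySem.List.pyRange (i+1) (((pvWords s).length : Int)+1)).map (fun j =>
      PySem.Str.join " " (PySem.List.slice (pvWords s) (some i) (some j))))

-- the candidate count: (number of strings containing it) - 1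
def pvG (arr : List String) (p : String) : Int :=
  (arr.foldl (fun c t => if PySem.Str.isIn p t then c + 1 else c) (0 : Int)) - 1

-- all substring slices of one string, in B's generation order
def pvSubs (t : String) : List String :=
  (PySem.List.pyRange 0 ((PySem.Str.len t : Int) + 1)).flatMap (fun i =>
    (PySem.List.pyRange i ((PySem.Str.len t : Int) + 1)).map (fun j =>
      PySem.Str.slice t (some i) (some j)))

-- B's stage-1 dedup, recursively
def pvDD : PySem.Set String → List String → List String
  | _, [] => []
  | seen, p :: t =>
    if PySem.Set.contains seen p then pvDD seen t
    else p :: pvDD (PySem.Set.add seen p) t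

-- invariant: the best-so-far dominates every already-seen part
def pvInv (arr : List String) (seen : PySem.Set String) (st : Int × String) : Prop :=
  ∀ p ∈ seen, pvG arr p ≤ st.1 ∧ (st.1 = pvG arr p → PySem.Str.len p ≤ PySem.Str.len st.2)

-- ---- join/splitOn facts ----
lemma pvJoin_append (sep : List Char) :
    ∀ (xs ys : List (List Char)), xs ≠ [] → ys ≠ [] →
    PySem.Chars.join sep (xs ++ ys) = PySem.Chars.join sep xs ++ sep ++ PySem.Chars.join sep ys := by
  intro xs
  induction xs with
  | nil => intro ys h _; exact absurd rfl h
  | cons x xs ih =>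
    intro ys _ hys
    cases xs with
    | nil =>
      cases ys with
      | nil => exact absurd rfl hys
      | cons y t =>
        simp [PySem.Chars.join_singleton, PySem.Chars.join_cons_cons]
    | cons x2 xs2 =>
      have hih := ih ys (by simp) hys
      rw [List.cons_append, List.cons_append,
          PySem.Chars.join_cons_cons sep x x2 (xs2 ++ ys),
          show x2 :: (xs2 ++ ys) = (x2 :: xs2) ++ ys from rfl, hih,
          PySem.Chars.join_cons_cons sep x x2 xs2]
      simp [List.append_assoc]

lemma pvJoin_merge (sep : List Char) (zs : List (List Char)) (a b : List Char) :
    PySem.Chars.join sep (zs ++ [a, b]) = PySem.Chars.join sep (zs ++ [a ++ sep ++ b]) := by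
  cases zs with
  | nil => simp [PySem.Chars.join_cons_cons, PySem.Chars.join_singleton]
  | cons z t =>
    rw [pvJoin_append sep (z :: t) [a, b] (by simp) (by simp),
        pvJoin_append sep (z :: t) [a ++ sep ++ b] (by simp) (by simp),
        PySem.Chars.join_cons_cons, PySem.Chars.join_singleton, PySem.Chars.join_singleton]

lemma pvGo_join (c : Char) :
    ∀ (fuel : Nat) (l cur : List Char) (acc : List (List Char)), l.length < fuel →
    PySem.Chars.join [c] (PySem.Chars.splitOn.go [c] fuel l cur acc)
      = PySem.Chars.join [c] (acc.reverse ++ [cur.reverse ++ l]) := by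
  intro fuel
  induction fuel with
  | zero => intro l cur acc h; omega
  | succ fuel ih =>
    intro l cur acc h
    cases l with
    | nil =>
      rw [show PySem.Chars.splitOn.go [c] (fuel + 1) [] cur acc = ((cur.reverse :: acc)).reverse from rfl]
      simp
    | cons ch rest =>
      rw [show PySem.Chars.splitOn.go [c] (fuel + 1) (ch :: rest) cur acc =
            (if [c].isPrefixOf (ch :: rest) then
               PySem.Chars.splitOn.go [c] fuel (List.drop 1 (ch :: rest)) [] (cur.reverse :: acc)
             else PySem.Chars.splitOn.go [c] fuel rest (ch :: cur) acc) from rfl]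
      by_cases hp : [c].isPrefixOf (ch :: rest) = true
      · rw [if_pos hp]
        have hc : c = ch := by simpa [List.isPrefixOf] using hp
        subst hc
        rw [ih (List.drop 1 (c :: rest)) [] (cur.reverse :: acc) (by simp at h ⊢; omega)]
        rw [show (cur.reverse :: acc).reverse ++ [([] : List Char).reverse ++ List.drop 1 (c :: rest)]
              = acc.reverse ++ [cur.reverse, rest] from by simp]
        rw [pvJoin_merge [c] acc.reverse cur.reverse rest]
        simp [List.append_assoc]
      · rw [if_neg hp]
        rw [ih rest (ch :: cur) acc (by simp at h ⊢; omega)]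
        simp [List.reverse_cons, List.append_assoc]

lemma pvRoundtrip (c : Char) (s : List Char) :
    PySem.Chars.join [c] (PySem.Chars.splitOn s [c]) = s := by
  rw [show PySem.Chars.splitOn s [c] = PySem.Chars.splitOn.go [c] (s.length + 1) s [] [] from rfl]
  rw [pvGo_join c (s.length + 1) s [] [] (by omega)]
  simp [PySem.Chars.join_singleton]

lemma pvJoin_take_prefix (sep : List Char) (q : List (List Char)) (n : Nat) :
    PySem.Chars.join sep (q.take n) <+: PySem.Chars.join sep q := by
  by_cases hq : q.take n = q
  · rw [hq]
  · by_cases ht : q.take n = []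
    · simp [ht, PySem.Chars.join_nil]
    · have hd : q.drop n ≠ [] := by
        intro hdrop
        exact hq (List.take_of_length_le (List.drop_eq_nil_iff.mp hdrop))
      have hj := pvJoin_append sep (q.take n) (q.drop n) ht hd
      rw [List.take_append_drop] at hj
      exact ⟨sep ++ PySem.Chars.join sep (q.drop n), by rw [hj]; simp [List.append_assoc]⟩

lemma pvJoin_drop_suffix (sep : List Char) (m : List (List Char)) (i : Nat) :
    PySem.Chars.join sep (m.drop i) <:+ PySem.Chars.join sep m := by
  by_cases hq : m.drop i = m
  · rw [hq]
  · by_cases ht : m.drop i = []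
    · simp [ht, PySem.Chars.join_nil]
    · have htk : m.take i ≠ [] := by
        intro h0
        apply hq
        have h1 := List.take_append_drop i m
        rw [h0] at h1
        simpa using h1
      have hj := pvJoin_append sep (m.take i) (m.drop i) htk ht
      rw [List.take_append_drop] at hj
      exact ⟨PySem.Chars.join sep (m.take i) ++ sep, by simp [hj, List.append_assoc]⟩

lemma pvJoin_slice_infix (sep : List Char) (m : List (List Char)) (i n : Nat) :
    PySem.Chars.join sep ((m.drop i).take n) <:+: PySem.Chars.join sep m := by
  obtain ⟨t, ht⟩ := pvJoin_take_prefix sep (m.drop i) n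
  obtain ⟨u, hu⟩ := pvJoin_drop_suffix sep m i
  exact ⟨u, t, by rw [← hu, ← ht]; simp [List.append_assoc]⟩

lemma pvWords_eq (s : String) :
    pvWords s = (PySem.Chars.splitOn s.toList [' ']).map String.ofList := by
  have hsp : (" " : String).toList = [' '] := rfl
  unfold pvWords
  simp [PySem.Str.split?, PySem.Chars.split?, hsp]

-- a generated part is contained in its own string
lemma pvPart_isIn (s : String) (i j : Int) (h0 : 0 ≤ i) (h1 : 0 ≤ j) :
    PySem.Str.isIn (PySem.Str.join " " (PySem.List.slice (pvWords s) (some i) (some j))) s = true := by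
  have hsp : (" " : String).toList = [' '] := rfl
  have hwl : (pvWords s).map String.toList = PySem.Chars.splitOn s.toList [' '] := by
    rw [pvWords_eq]
    simp [List.map_map, Function.comp_def]
  show PySem.Chars.isIn _ s.toList = true
  rw [PySem.Chars.isIn_iff_infix, PySem.Str.toList_join, hsp,
      PySem.List.slice_toNat _ h0 h1, List.map_take, List.map_drop, hwl]
  have h := pvJoin_slice_infix [' '] (PySem.Chars.splitOn s.toList [' ']) i.toNat (j.toNat - i.toNat)
  rw [pvRoundtrip] at h
  exact h

-- ---- counting ----
lemma pvFoldl_count (p : String) (l : List String) (c : Int) :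
    l.foldl (fun c t => if PySem.Str.isIn p t then c + 1 else c) c
      = c + (l.countP (fun t => PySem.Str.isIn p t) : Int) := by
  induction l generalizing c with
  | nil => simp
  | cons t l ih =>
    simp only [List.foldl_cons, List.countP_cons]
    by_cases h : PySem.Str.isIn p t = true
    · rw [if_pos h, ih, if_pos h]; push_cast; ring
    · rw [if_neg h, ih, if_neg h]; push_cast; ring

lemma pvAcount_go (arr : List String) (part : String) (x : Int)
    (hx0 : 0 ≤ x) (_hx1 : x < (arr.length : Int))
    (hin : PySem.Str.isIn part (PySem.List.pyGetD arr x "") = true) :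
    ∀ m : Nat, m ≤ arr.length →
    List.foldl (fun (c : Int) (k : Nat) =>
        if PySem.Str.isIn part (PySem.List.pyGetD arr (↑k) "") && !(x == (↑k : Int))
        then c + 1 else c) (0 : Int) (List.range m)
      = ((arr.take m).countP (fun t => PySem.Str.isIn part t) : Int)
        - (if x < (m : Int) then 1 else 0) := by
  intro m
  induction m with
  | zero =>
    intro _
    rw [if_neg (by omega)]
    simp
  | succ m ih =>
    intro hm
    have hmlt : m < arr.length := by omega
    rw [List.range_succ, List.foldl_append, ih (by omega)]
    have htake : arr.take (m + 1) = arr.take m ++ [arr[m]] := by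
      rw [List.take_add_one, List.getElem?_eq_getElem hmlt]
      rfl
    have hget : PySem.List.pyGetD arr ((m : Nat) : Int) "" = arr[m] := by
      rw [PySem.List.pyGetD_natCast]
      exact List.getD_eq_getElem arr "" hmlt
    rw [htake, List.countP_append]
    simp only [List.foldl_cons, List.foldl_nil, List.countP_cons, List.countP_nil]
    by_cases hxm : x = (m : Int)
    · have hinm : PySem.Str.isIn part arr[m] = true := by
        have h' := hin
        rw [hxm, hget] at h'
        exact h'
      rw [hget]
      simp only [hxm, beq_self_eq_true, Bool.not_true, Bool.and_false, if_neg (by simp : ¬ (false = true)), hinm]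
      push_cast
      split_ifs <;> omega
    · have hbne : (x == (m : Int)) = false := by simp [hxm]
      rw [hget, hbne]
      simp only [Bool.not_false, Bool.and_true]
      by_cases hi : PySem.Str.isIn part arr[m] = true
      · rw [if_pos hi, if_pos hi]
        push_cast
        split_ifs <;> omega
      · rw [if_neg hi, if_neg hi]
        push_cast
        split_ifs <;> omega

lemma pvAcount_eq (arr : List String) (part : String) (x : Int)
    (hx0 : 0 ≤ x) (hx1 : x < (arr.length : Int))
    (hin : PySem.Str.isIn part (PySem.List.pyGetD arr x "") = true) :
    (PySem.List.pyRange 0 (arr.length : Int)).foldl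
      (fun count y => if PySem.Str.isIn part (PySem.List.pyGetD arr y "") && !(x == y)
                      then count + 1 else count) (0 : Int)
      = pvG arr part := by
  rw [PySem.List.pyRange_zero_natCast, List.foldl_map,
      pvAcount_go arr part x hx0 hx1 hin arr.length le_rfl,
      List.take_length, if_pos hx1]
  unfold pvG
  rw [pvFoldl_count]
  simp

-- ---- fold shapes ----
lemma pvFoldl_flatMap {α β σ : Type} (f : σ → β → σ) (g : α → List β) (l : List α) (init : σ) :
    (l.flatMap g).foldl f init = l.foldl (fun st a => (g a).foldl f st) init := by
  induction l generalizing init with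
  | nil => rfl
  | cons a t ih => simp [List.flatMap_cons, List.foldl_append, ih]

lemma pvFlatMap_congr {α β : Type} (l : List α) (f g : α → List β)
    (h : ∀ a ∈ l, f a = g a) : l.flatMap f = l.flatMap g := by
  induction l with
  | nil => rfl
  | cons a t ih =>
    simp only [List.flatMap_cons]
    rw [h a (by simp), ih (fun b hb => h b (by simp [hb]))]

lemma pvFlatMap_index {α β : Type} (l : List α) (d : α) (F : α → List β) :
    (PySem.List.pyRange 0 (l.length : Int)).flatMap (fun x => F (PySem.List.pyGetD l x d))
      = l.flatMap F := by
  conv_rhs => rw [← PySem.List.map_pyGetD_pyRange_zero l d]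
  rw [List.flatMap_map]
  rfl

-- A's generated (count, part) list, reshaped onto the part stream
lemma pvStream_eq (arr : List String) :
    (PySem.List.pyRange 0 (arr.length : Int)).flatMap (fun x =>
      (PySem.List.pyRange 0 ((((PySem.Str.split? (PySem.List.pyGetD arr x "") " ").getD []).length : Int))).flatMap (fun i =>
        (PySem.List.pyRange (i + 1) ((((PySem.Str.split? (PySem.List.pyGetD arr x "") " ").getD []).length : Int) + 1)).map (fun j =>
          ((PySem.List.pyRange 0 (arr.length : Int)).foldl (fun count y =>
              if PySem.Str.isIn (PySem.Str.join " " (PySem.List.slice ((PySem.Str.split? (PySem.List.pyGetD arr x "") " ").getD []) (some i) (some j))) (PySem.List.pyGetD arr y "") && !(x == y)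
              then count + 1 else count) (0 : Int),
           PySem.Str.join " " (PySem.List.slice ((PySem.Str.split? (PySem.List.pyGetD arr x "") " ").getD []) (some i) (some j))))))
    = (arr.flatMap pvParts).map (fun p => (pvG arr p, p)) := by
  rw [List.map_flatMap]
  rw [← pvFlatMap_index arr "" (fun s => (pvParts s).map (fun p => (pvG arr p, p)))]
  apply pvFlatMap_congr
  intro x hx
  obtain ⟨hx0, hx1⟩ := PySem.List.mem_pyRange_one.mp hx
  unfold pvParts pvWords
  rw [List.map_flatMap]
  apply pvFlatMap_congr
  intro i hi
  rw [List.map_map]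
  apply List.map_congr_left
  intro j hj
  obtain ⟨hi0, _⟩ := PySem.List.mem_pyRange_one.mp hi
  obtain ⟨hj1, _⟩ := PySem.List.mem_pyRange_one.mp hj
  have hj0 : (0 : Int) ≤ j := by omega
  simp only [Function.comp_apply]
  refine Prod.ext ?_ rfl
  exact pvAcount_eq arr _ x hx0 hx1
    (pvPart_isIn (PySem.List.pyGetD arr x "") i j hi0 hj0)

-- A's generated list, reshaped
lemma pvA_result (arr : List String) :
    findstem arr = ((arr.flatMap pvParts).foldl
      (fun st p => pvSel st (pvG arr p, p)) ((0 : Int), "")).2 := by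
  simp only [findstem]
  simp only [PySem.List.foldl_append_singleton_eq_map, PySem.List.foldl_append_eq_flatMap,
    List.nil_append]
  rw [pvStream_eq arr, ← List.foldl_map]
  rfl

-- ---- B stage 1: the dedup fold produces pvDD of the part stream ----
lemma pvGen_eq : ∀ (l : List String) (seen : PySem.Set String) (acc : List String),
    l.foldl (fun (a : PySem.Set String × List String) p =>
        if PySem.Set.contains a.1 p then a else (PySem.Set.add a.1 p, a.2 ++ [p])) (seen, acc)
      = (l.foldl PySem.Set.add seen, acc ++ pvDD seen l) := by
  intro l
  induction l with
  | nil => intro seen acc; simp [pvDD]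
  | cons p t ih =>
    intro seen acc
    rw [List.foldl_cons, List.foldl_cons]
    by_cases hc : PySem.Set.contains seen p = true
    · have hp : p ∈ seen := (PySem.Set.contains_iff seen p).mp hc
      have hadd : PySem.Set.add seen p = seen := by simp [PySem.Set.add, hp]
      rw [if_pos hc, ih seen acc, hadd,
          show pvDD seen (p :: t) = pvDD seen t from by simp [pvDD, hp]]
    · have hp : p ∉ seen := fun h => hc ((PySem.Set.contains_iff seen p).mpr h)
      rw [if_neg hc, ih (PySem.Set.add seen p) (acc ++ [p]),
          show pvDD seen (p :: t) = p :: pvDD (PySem.Set.add seen p) t from by simp [pvDD, hp]]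
      simp

-- B's stage-1 nested fold, reshaped onto the flattened part stream
lemma pvB_parts (arr : List String) (st0 : PySem.Set String × List String) :
    arr.foldl (fun (acc : PySem.Set String × List String) s =>
      let w := (PySem.Str.split? s " ").getD []
      (PySem.List.pyRange 0 (w.length : Int)).foldl (fun acc i =>
        (PySem.List.pyRange (i+1) ((w.length : Int)+1)).foldl (fun acc j =>
          let p := PySem.Str.join " " (PySem.List.slice w (some i) (some j))
          if PySem.Set.contains acc.1 p then acc
          else (PySem.Set.add acc.1 p, acc.2 ++ [p])) acc) acc) st0
    = (arr.flatMap pvParts).foldl (fun (a : PySem.Set String × List String) p =>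
        if PySem.Set.contains a.1 p then a else (PySem.Set.add a.1 p, a.2 ++ [p])) st0 := by
  rw [pvFoldl_flatMap]
  refine PySem.List.foldl_congr_mem arr _ _ _ (fun st s _ => ?_)
  unfold pvParts
  rw [pvFoldl_flatMap]
  refine PySem.List.foldl_congr_mem _ _ _ _ (fun st2 i _ => ?_)
  rw [List.foldl_map]
  rfl

-- ---- B stage 2: the substring index counts containment ----
lemma pvSubs_set (t : String) :
    (PySem.List.pyRange 0 ((PySem.Str.len t : Int) + 1)).foldl (fun sb i =>
        (PySem.List.pyRange i ((PySem.Str.len t : Int) + 1)).foldl (fun sb j =>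
          PySem.Set.add sb (PySem.Str.slice t (some i) (some j))) sb)
      (PySem.Set.empty : PySem.Set String)
    = PySem.Set.ofList (pvSubs t) := by
  rw [PySem.Set.ofList_eq_foldl]
  unfold pvSubs
  rw [pvFoldl_flatMap]
  refine (PySem.List.foldl_congr_mem _ _ _ _ (fun sb i _ => ?_)).symm
  rw [List.foldl_map]

-- membership in the slice list is substring containment
lemma pvMem_pvSubs (p t : String) : p ∈ pvSubs t ↔ PySem.Str.isIn p t = true := by
  rw [PySem.Str.isIn_iff_infix]
  constructor
  · intro hm
    obtain ⟨i, hi, hm2⟩ := List.mem_flatMap.mp hm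
    obtain ⟨j, hj, hpe⟩ := List.mem_map.mp hm2
    obtain ⟨hi0, _⟩ := PySem.List.mem_pyRange_one.mp hi
    obtain ⟨hj1, _⟩ := PySem.List.mem_pyRange_one.mp hj
    have hj0 : (0 : Int) ≤ j := by omega
    have hpl : p.toList = (t.toList.drop i.toNat).take (j.toNat - i.toNat) := by
      rw [← hpe, PySem.Str.toList_slice]
      exact PySem.List.slice_toNat _ hi0 hj0
    obtain ⟨u, hu⟩ := List.take_prefix (j.toNat - i.toNat) (t.toList.drop i.toNat)
    obtain ⟨v, hv⟩ := List.drop_suffix i.toNat t.toList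
    exact ⟨v, u, by rw [hpl, List.append_assoc, hu, hv]⟩
  · intro hinf
    obtain ⟨s₁, s₂, hsplit⟩ := hinf
    have hlen : s₁.length + p.toList.length + s₂.length = t.toList.length := by
      rw [← hsplit]; simp only [List.length_append]
    refine List.mem_flatMap.mpr ⟨((s₁.length : Nat) : Int), ?_, ?_⟩
    · refine PySem.List.mem_pyRange_one.mpr ⟨by positivity, ?_⟩
      rw [PySem.Str.len_eq]; push_cast; omega
    · refine List.mem_map.mpr ⟨(((s₁.length + p.toList.length : Nat)) : Int), ?_, ?_⟩
      · refine PySem.List.mem_pyRange_one.mpr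
          ⟨by omega, by rw [PySem.Str.len_eq]; push_cast; omega⟩
      · apply String.toList_inj.mp
        rw [PySem.Str.toList_slice]
        show PySem.List.slice t.toList _ _ = _
        rw [PySem.List.slice_natCast, ← hsplit]
        rw [Nat.add_sub_cancel_left, List.append_assoc, List.drop_left, List.take_left]

lemma pvCnt_getD (p : String) : ∀ (l : List String) (d : PySem.Dict String Int),
    (l.foldl (fun (d : PySem.Dict String Int) t =>
        (PySem.Set.ofList (pvSubs t)).foldl (fun d u => d.insert u (d.getD u 0 + 1)) d) d).getD p 0
      = d.getD p 0 + (l.countP (fun t => PySem.Str.isIn p t) : Int) := by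
  intro l
  induction l with
  | nil => intro d; simp
  | cons t l ih =>
    intro d
    rw [List.foldl_cons, ih, PySem.Dict.getD_foldl_insert_add_one, List.countP_cons]
    have hcnt : (List.count p (PySem.Set.ofList (pvSubs t)) : Int)
        = if PySem.Str.isIn p t = true then 1 else 0 := by
      by_cases hin : PySem.Str.isIn p t = true
      · rw [if_pos hin, List.count_eq_one_of_mem (PySem.Set.nodup_ofList _)
            ((PySem.Set.mem_ofList _ _).mpr ((pvMem_pvSubs p t).mpr hin))]
        rfl
      · rw [if_neg hin, List.count_eq_zero_of_not_mem]
        · rfl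
        · intro hmem
          exact hin ((pvMem_pvSubs p t).mp ((PySem.Set.mem_ofList _ _).mp hmem))
    rw [hcnt]
    by_cases hin : PySem.Str.isIn p t = true
    · rw [if_pos hin, if_pos hin]; push_cast; ring
    · rw [if_neg hin, if_neg hin]; push_cast; ring

-- B's stage-3 step is A's selection step on the candidate's global count
lemma pvStep3_eq (arr : List String) (cnt : PySem.Dict String Int)
    (hcnt : ∀ p, cnt.getD p 0 = (arr.countP (fun t => PySem.Str.isIn p t) : Int))
    (st : Int × String) (p : String) :
    (let c := cnt.getD p 0 - 1;
     if c > st.1 || (c == st.1 && PySem.Str.len p > PySem.Str.len st.2)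
     then (c, p) else st)
    = pvSel st (pvG arr p, p) := by
  have hgp : cnt.getD p 0 - 1 = pvG arr p := by
    unfold pvG
    rw [pvFoldl_count, hcnt p]
    ring
  simp only [hgp]
  unfold pvSel
  by_cases h1 : pvG arr p > st.1
  · simp [h1]
  · rw [if_neg h1]
    have hd1 : decide (pvG arr p > st.1) = false := by simp [h1]
    rw [hd1, Bool.false_or]
    by_cases h2 : (pvG arr p == st.1 && decide (PySem.Str.len p > PySem.Str.len st.2)) = true
    · rw [if_pos h2, if_pos h2]
      have : pvG arr p = st.1 := beq_iff_eq.mp ((Bool.and_eq_true _ _).mp h2).1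
      rw [this]
    · rw [if_neg h2, if_neg h2]

-- ---- dedup is sound for the selection fold ----
lemma pvSel_absorb (arr : List String) (seen : PySem.Set String) (st : Int × String)
    (hInv : pvInv arr seen st) (p : String) (hp : p ∈ seen) :
    pvSel st (pvG arr p, p) = st := by
  obtain ⟨hle, him⟩ := hInv p hp
  unfold pvSel
  rw [if_neg (by omega)]
  rw [if_neg ?_]
  simp only [Bool.and_eq_true, beq_iff_eq, decide_eq_true_eq, not_and]
  intro he
  have := him he.symm
  omega

lemma pvInv_step (arr : List String) (seen : PySem.Set String) (st : Int × String)
    (hInv : pvInv arr seen st) (p : String) :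
    pvInv arr (PySem.Set.add seen p) (pvSel st (pvG arr p, p)) := by
  intro q hq
  rw [PySem.Set.mem_add] at hq
  unfold pvSel
  dsimp only
  split_ifs with hgt heq
  · rcases hq with hq | hq
    · obtain ⟨hle, _⟩ := hInv q hq
      exact ⟨by omega, fun h => absurd h (by omega)⟩
    · subst hq
      exact ⟨le_refl _, fun _ => le_refl _⟩
  · simp only [Bool.and_eq_true, beq_iff_eq, decide_eq_true_eq] at heq
    obtain ⟨he, hlt⟩ := heq
    rcases hq with hq | hq
    · obtain ⟨hle, him⟩ := hInv q hq
      exact ⟨hle, fun h => le_trans (him h) (le_of_lt hlt)⟩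
    · subst hq
      exact ⟨le_of_eq he, fun _ => le_refl _⟩
  · rcases hq with hq | hq
    · exact hInv q hq
    · subst hq
      refine ⟨by omega, fun h => ?_⟩
      by_contra hlen
      exact heq (by
        simp only [Bool.and_eq_true, beq_iff_eq, decide_eq_true_eq]
        exact ⟨h.symm, by omega⟩)

-- selecting over the deduplicated stream equals selecting over the full stream
lemma pvDDsel (arr : List String) :
    ∀ (l : List String) (seen : PySem.Set String) (st : Int × String), pvInv arr seen st →
    (pvDD seen l).foldl (fun st p => pvSel st (pvG arr p, p)) st
      = l.foldl (fun st p => pvSel st (pvG arr p, p)) st := by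
  intro l
  induction l with
  | nil => intro seen st _; rfl
  | cons p t ih =>
    intro seen st hInv
    simp only [pvDD, List.foldl_cons]
    by_cases hc : PySem.Set.contains seen p = true
    · rw [if_pos hc, ih seen st hInv,
          pvSel_absorb arr seen st hInv p ((PySem.Set.contains_iff seen p).mp hc)]
    · rw [if_neg hc, List.foldl_cons]
      exact ih (PySem.Set.add seen p) _ (pvInv_step arr seen st hInv p)

-- B reshaped: dedup'd stream, counter counts, selection
lemma pvB_result (arr : List String) :
    findstem_alt arr = ((pvDD PySem.Set.empty (arr.flatMap pvParts)).foldl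
      (fun st p => pvSel st (pvG arr p, p)) ((0 : Int), "")).2 := by
  simp only [findstem_alt]
  rw [pvB_parts arr (PySem.Set.empty, []),
      pvGen_eq (arr.flatMap pvParts) PySem.Set.empty []]
  have hcnt : ∀ p, (arr.foldl (fun (d : PySem.Dict String Int) t =>
      let subs := (PySem.List.pyRange 0 ((PySem.Str.len t : Int) + 1)).foldl (fun sb i =>
          (PySem.List.pyRange i ((PySem.Str.len t : Int) + 1)).foldl (fun sb j =>
            PySem.Set.add sb (PySem.Str.slice t (some i) (some j))) sb)
        (PySem.Set.empty : PySem.Set String)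
      subs.foldl (fun d u => d.insert u (d.getD u 0 + 1)) d)
      (PySem.Dict.empty : PySem.Dict String Int)).getD p 0
      = (arr.countP (fun t => PySem.Str.isIn p t) : Int) := by
    intro p
    have hre : arr.foldl (fun (d : PySem.Dict String Int) t =>
        let subs := (PySem.List.pyRange 0 ((PySem.Str.len t : Int) + 1)).foldl (fun sb i =>
            (PySem.List.pyRange i ((PySem.Str.len t : Int) + 1)).foldl (fun sb j =>
              PySem.Set.add sb (PySem.Str.slice t (some i) (some j))) sb)
          (PySem.Set.empty : PySem.Set String)
        subs.foldl (fun d u => d.insert u (d.getD u 0 + 1)) d)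
        (PySem.Dict.empty : PySem.Dict String Int)
      = arr.foldl (fun (d : PySem.Dict String Int) t =>
          (PySem.Set.ofList (pvSubs t)).foldl (fun d u => d.insert u (d.getD u 0 + 1)) d)
        (PySem.Dict.empty : PySem.Dict String Int) := by
      refine PySem.List.foldl_congr_mem arr _ _ _ (fun d t _ => ?_)
      simp only [pvSubs_set t]
    rw [hre, pvCnt_getD]
    simp
  have hsel : (pvDD PySem.Set.empty (arr.flatMap pvParts)).foldl
      (fun (st : Int × String) p =>
        let c := (arr.foldl (fun (d : PySem.Dict String Int) t =>
          let subs := (PySem.List.pyRange 0 ((PySem.Str.len t : Int) + 1)).foldl (fun sb i =>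
              (PySem.List.pyRange i ((PySem.Str.len t : Int) + 1)).foldl (fun sb j =>
                PySem.Set.add sb (PySem.Str.slice t (some i) (some j))) sb)
            (PySem.Set.empty : PySem.Set String)
          subs.foldl (fun d u => d.insert u (d.getD u 0 + 1)) d)
          (PySem.Dict.empty : PySem.Dict String Int)).getD p 0 - 1
        if c > st.1 || (c == st.1 && PySem.Str.len p > PySem.Str.len st.2)
        then (c, p) else st) ((0 : Int), "")
      = (pvDD PySem.Set.empty (arr.flatMap pvParts)).foldl
          (fun st p => pvSel st (pvG arr p, p)) ((0 : Int), "") := by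
    refine PySem.List.foldl_congr_mem _ _ _ _ (fun st p _ => ?_)
    exact pvStep3_eq arr _ hcnt st p
  simpa using congrArg Prod.snd hsel

-- ===== VERDICT (by name: the statement is the Claim_ definition above) =====
theorem findstem_spec : Claim_equal_findstem := by
  intro arr _
  unfold Spec_findstem
  rw [pvA_result, pvB_result]
  rw [pvDDsel arr _ _ _ (by intro p hp; simp [PySem.Set.empty] at hp)]
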